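-- pv_equiv track=rewrite | github.com/strovertz/testing | libs/escalas.py | escala_maturacao_soja
-- ===== SOURCE A (Python) =====
-- def escala_maturacao_soja(dias_desde_plantio):
--     limites_dias = {
--         'imatura': 60,
--         'emergindo': 90,
--         'madura': 120,
--         'passada': 150
--     }
--     cores = {
--         'imatura': 'green',
--         'emergindo': 'yellow',
--         'madura': 'orange',
--         'passada': 'red'
--     }
--
--     for maturidade, limite in limites_dias.items():
--         if dias_desde_plantio <= limite:
--             return cores[maturidade]
--
--     return cores['passada']
-- ===== SOURCE B (Python) =====
-- import bisect
--
-- _LIMITES = [60, 90, 120, 150]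
-- _CORES = ['green', 'yellow', 'orange', 'red']
--
-- def escala_maturacao_soja(dias_desde_plantio):
--     i = bisect.bisect_left(_LIMITES, dias_desde_plantio)
--     return _CORES[min(i, 3)]
-- ===== Notes on version B (the rewrite author's own statement) =====
-- stated objective: idiomatic
-- what changed: Replaces the dict-iterating linear scan and branch cascade with a binary search (bisect_left) over a parallel sorted limits list, clamping the index to the last color.
import Mathlib
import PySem

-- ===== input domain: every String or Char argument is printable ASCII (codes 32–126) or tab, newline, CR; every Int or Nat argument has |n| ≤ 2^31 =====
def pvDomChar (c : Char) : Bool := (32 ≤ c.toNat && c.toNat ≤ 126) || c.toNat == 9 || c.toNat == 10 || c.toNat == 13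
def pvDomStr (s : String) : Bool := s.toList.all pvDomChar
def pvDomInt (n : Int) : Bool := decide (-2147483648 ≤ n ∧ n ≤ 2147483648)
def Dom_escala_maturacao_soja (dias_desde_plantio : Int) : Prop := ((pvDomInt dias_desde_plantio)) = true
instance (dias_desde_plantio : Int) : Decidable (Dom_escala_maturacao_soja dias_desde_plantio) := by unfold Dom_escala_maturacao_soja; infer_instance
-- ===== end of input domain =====

-- B replaces A's linear scan over the dict of thresholds with a bisect_left binary
-- search on a parallel sorted limits list (idiomatic; same result).

-- ===== PORT A =====
-- the two dicts of A, as insertion-ordered association lists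
def pvLimitesDias : PySem.Dict String Int :=
  PySem.Dict.mk [("imatura", 60), ("emergindo", 90), ("madura", 120), ("passada", 150)]
def pvCores : PySem.Dict String String :=
  PySem.Dict.mk [("imatura", "green"), ("emergindo", "yellow"), ("madura", "orange"), ("passada", "red")]

-- the for-loop with early return over limites_dias.items()
def pvScanA (items : List (String × Int)) (d : Int) : Option String :=
  match items with
  | [] => none
  | (m, l) :: rest => if d ≤ l then PySem.Dict.get? pvCores m else pvScanA rest d

def escala_maturacao_soja (dias_desde_plantio : Int) : String :=
  match pvScanA pvLimitesDias.items dias_desde_plantio with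
  | some c => c
  | none => (PySem.Dict.get? pvCores "passada").getD ""

-- ===== PORT B =====
def pvLimites : List Int := [60, 90, 120, 150]
def pvCoresB : List String := ["green", "yellow", "orange", "red"]

-- bisect.bisect_left(lst, x) : lo/hi binary search loop, transliterated with a fuel
-- bound (hi - lo halves each step, so fuel = hi iterations always suffice)
def pvBisectGo (lst : List Int) (x : Int) : Nat → Nat → Nat → Nat
  | 0, lo, _ => lo
  | fuel + 1, lo, hi =>
    if lo < hi then
      let mid := (lo + hi) / 2
      if lst.getD mid 0 < x then pvBisectGo lst x fuel (mid + 1) hi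
      else pvBisectGo lst x fuel lo mid
    else lo

def pvBisectLeft (lst : List Int) (x : Int) (lo hi : Nat) : Nat :=
  pvBisectGo lst x hi lo hi

def escala_maturacao_soja_alt (dias_desde_plantio : Int) : String :=
  let i := pvBisectLeft pvLimites dias_desde_plantio 0 pvLimites.length
  pvCoresB.getD (min i 3) ""

-- ===== PRECONDITION & SPEC =====
def Spec_escala_maturacao_soja (dias_desde_plantio : Int) (out : String) : Prop := out = escala_maturacao_soja_alt dias_desde_plantio
instance (dias_desde_plantio : Int) (out : String) : Decidable (Spec_escala_maturacao_soja dias_desde_plantio out) := by unfold Spec_escala_maturacao_soja; infer_instance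

-- ===== CLAIM (what is proved, stated in full; the proofs are below) =====
def Claim_equal_escala_maturacao_soja : Prop := ∀ (dias_desde_plantio : Int), Dom_escala_maturacao_soja dias_desde_plantio → Spec_escala_maturacao_soja dias_desde_plantio (escala_maturacao_soja dias_desde_plantio)

-- ===== LEMMAS AND PROOFS =====

-- ===== VERDICT (by name: the statement is the Claim_ definition above) =====
theorem escala_maturacao_soja_spec : Claim_equal_escala_maturacao_soja := by
  intro d _
  unfold Spec_escala_maturacao_soja escala_maturacao_soja escala_maturacao_soja_alt
  by_cases h1 : d ≤ 60
  · simp [pvBisectLeft, pvBisectGo, pvScanA, pvLimitesDias, pvCores, pvLimites, pvCoresB, PySem.Dict.get?_mk_cons, h1, show ¬(120:Int) < d by omega, show ¬(90:Int) < d by omega,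
      show ¬(60:Int) < d by omega]
  · by_cases h2 : d ≤ 90
    · simp [pvBisectLeft, pvBisectGo, pvScanA, pvLimitesDias, pvCores, pvLimites, pvCoresB, PySem.Dict.get?_mk_cons, h1, h2, show ¬(120:Int) < d by omega, show ¬(90:Int) < d by omega,
        show (60:Int) < d by omega]
    · by_cases h3 : d ≤ 120
      · simp [pvBisectLeft, pvBisectGo, pvScanA, pvLimitesDias, pvCores, pvLimites, pvCoresB, PySem.Dict.get?_mk_cons, h1, h2, h3, show ¬(120:Int) < d by omega, show (90:Int) < d by omega]
      · by_cases h4 : d ≤ 150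
        · simp [pvBisectLeft, pvBisectGo, pvScanA, pvLimitesDias, pvCores, pvLimites, pvCoresB, PySem.Dict.get?_mk_cons, h1, h2, h3, h4, show (120:Int) < d by omega, show ¬(150:Int) < d by omega]
        · simp [pvBisectLeft, pvBisectGo, pvScanA, pvLimitesDias, pvCores, pvLimites, pvCoresB, PySem.Dict.get?_mk_cons, h1, h2, h3, h4, show (120:Int) < d by omega, show (150:Int) < d by omega]
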